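-- pv_equiv track=rewrite | github.com/ljm234/amoebanator-25 | ml/data/compliance.py | _validate_orcid_checksum
-- ===== SOURCE A (Python) =====
-- def _validate_orcid_checksum(orcid_digits: str) -> bool:
--     """ISO 7064 Mod 11-2 checksum used by ORCID."""
--     total = 0
--     for char in orcid_digits[:-1]:
--         if char == "-":
--             continue
--         total = (total + int(char)) * 2
--     remainder = total % 11
--     check = (12 - remainder) % 11
--     expected = "X" if check == 10 else str(check)
--     return orcid_digits[-1] == expected
-- ===== SOURCE B (Python) =====
-- def _validate_orcid_checksum(orcid_digits: str) -> bool: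
--     """ISO 7064 Mod 11-2, computed right-to-left with modular weights.
--
--     Walks the body in reverse, keeping a doubling weight mod 11 instead of
--     a Horner accumulator, and compares the check digit by numeric value.
--     """
--     last = orcid_digits[-1]
--     total = 0
--     weight = 2
--     for ch in reversed(orcid_digits[:-1]):
--         if ch != "-":
--             total = (total + int(ch) * weight) % 11
--             weight = weight * 2 % 11
--     check = (12 - total) % 11
--     value = 10 if last == "X" else (int(last) if last.isdigit() else -1)
--     return value == check
-- ===== Notes on version B (the rewrite author's own statement) =====
-- stated objective: alternative
-- what changed: B traverses the body right-to-left with a doubling positional weight kept mod 11 (A folds left-to-right with a Horner accumulator (total+d)*2), and compares the check digit numerically (mapping 'X' to 10) instead of building the expected string.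
import Mathlib
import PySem

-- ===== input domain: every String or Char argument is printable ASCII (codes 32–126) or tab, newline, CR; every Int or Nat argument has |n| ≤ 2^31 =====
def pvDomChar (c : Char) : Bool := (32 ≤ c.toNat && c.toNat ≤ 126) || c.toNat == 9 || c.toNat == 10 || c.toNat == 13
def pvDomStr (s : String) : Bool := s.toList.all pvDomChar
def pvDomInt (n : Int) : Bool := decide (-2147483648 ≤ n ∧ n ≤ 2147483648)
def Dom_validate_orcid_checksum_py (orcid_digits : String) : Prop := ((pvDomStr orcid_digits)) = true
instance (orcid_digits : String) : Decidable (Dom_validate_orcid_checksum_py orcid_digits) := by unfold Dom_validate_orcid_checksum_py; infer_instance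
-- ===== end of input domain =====

-- B walks the body RIGHT-TO-LEFT with a doubling weight kept mod 11 (instead of A's
-- left-to-right Horner accumulator) and compares the check digit by numeric value
-- (objective: alternative decomposition, same cost).

-- int(char) for a single character; Pre_ guarantees the character is a digit, so ofChars? is some
def pvDigit (c : Char) : Int := (PySem.Int.ofChars? [c]).getD 0

-- ===== PORT A =====
def validate_orcid_checksum_py (orcid_digits : String) : Bool :=
  let l := orcid_digits.toList
  -- for char in orcid_digits[:-1]: if char == "-": continue; total = (total + int(char)) * 2
  let total : Int :=
    (PySem.List.slice l none (some (-1))).foldl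
      (fun t c => if c == '-' then t else (t + pvDigit c) * 2) 0
  let remainder := PySem.Int.mod total 11
  let check := PySem.Int.mod (12 - remainder) 11
  -- expected = "X" if check == 10 else str(check)   (strings kept as char lists)
  let expected : List Char := if check == 10 then ['X'] else PySem.Int.toChars check
  match PySem.List.pyGet? l (-1) with
  | none => false   -- IndexError on empty input; excluded by Pre_
  | some c => [c] == expected

-- ===== PORT B =====
def validate_orcid_checksum_py_alt (orcid_digits : String) : Bool :=
  let l := orcid_digits.toList
  -- last = orcid_digits[-1]
  match PySem.List.pyGet? l (-1) with
  | none => false   -- IndexError on empty input; excluded by Pre_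
  | some last =>
    -- for ch in reversed(orcid_digits[:-1]): if ch != "-": total=(total+int(ch)*weight)%11; weight=weight*2%11
    let tw : Int × Int :=
      (PySem.List.slice l none (some (-1))).reverse.foldl
        (fun s c => if c != '-'
          then (PySem.Int.mod (s.1 + pvDigit c * s.2) 11, PySem.Int.mod (s.2 * 2) 11)
          else s)
        (0, 2)
    let check := PySem.Int.mod (12 - tw.1) 11
    -- value = 10 if last == "X" else (int(last) if last.isdigit() else -1)
    let value : Int :=
      if last == 'X' then 10
      else if PySem.Chars.isdigit last then pvDigit last else -1
    value == check

-- ===== PRECONDITION & SPEC =====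
-- Pre_ excludes exactly the inputs where Python A raises: the empty string (IndexError on
-- orcid_digits[-1]) and strings whose body contains a character that is neither '-' nor a
-- decimal digit (ValueError from int(char)); B raises there too.
def Pre_validate_orcid_checksum_py (orcid_digits : String) : Prop :=
  (!orcid_digits.toList.isEmpty &&
    orcid_digits.toList.dropLast.all (fun c => c == '-' || PySem.Chars.isdigit c)) = true
instance (orcid_digits : String) : Decidable (Pre_validate_orcid_checksum_py orcid_digits) := by
  unfold Pre_validate_orcid_checksum_py; infer_instance

def pvWitness_validate_orcid_checksum_py : String := "01"

def Spec_validate_orcid_checksum_py (orcid_digits : String) (out : Bool) : Prop := out = validate_orcid_checksum_py_alt orcid_digits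
instance (orcid_digits : String) (out : Bool) : Decidable (Spec_validate_orcid_checksum_py orcid_digits out) := by unfold Spec_validate_orcid_checksum_py; infer_instance

-- ===== CLAIM (what is proved, stated in full; the proofs are below) =====
def Claim_equal_validate_orcid_checksum_py : Prop := ∀ (orcid_digits : String), Dom_validate_orcid_checksum_py orcid_digits → Pre_validate_orcid_checksum_py orcid_digits → Spec_validate_orcid_checksum_py orcid_digits (validate_orcid_checksum_py orcid_digits)

-- ===== LEMMAS AND PROOFS =====

-- PySem.Int.mod by the positive literal 11 is Lean's emod
theorem mod11 (a : Int) : PySem.Int.mod a 11 = a % 11 :=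
  PySem.Int.mod_eq_emod_of_pos (a := a) (b := 11) (by norm_num)

-- the weighted checksum sum: digit d at depth |ds| below it carries weight w * 2^|ds|
def Wsum : List Int → Int → Int
  | [], _ => 0
  | d :: ds, w => d * (w * 2 ^ ds.length) + Wsum ds w

-- A's Horner fold from t equals t·2^len plus the weighted sum with base weight 2
theorem horner_eq_wsum (ds : List Int) (t : Int) :
    ds.foldl (fun t d => (t + d) * 2) t = t * 2 ^ ds.length + Wsum ds 2 := by
  induction ds generalizing t with
  | nil => simp [Wsum]
  | cons d ds ih =>
    simp only [List.foldl_cons, ih, Wsum, List.length_cons, pow_succ]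
    ring

-- (a % 11 + d * (b % 11)) % 11 = (a + d * b) % 11
theorem modmix (a b d : Int) : (a % 11 + d * (b % 11)) % 11 = (a + d * b) % 11 := by
  conv_rhs => rw [Int.add_emod, Int.mul_emod]
  rw [Int.add_emod, Int.mul_emod d (b % 11), Int.emod_emod_of_dvd _ dvd_rfl,
    Int.emod_emod_of_dvd _ dvd_rfl]

theorem modmul2 (b : Int) : (b % 11 * 2) % 11 = (b * 2) % 11 := by
  rw [Int.mul_emod, Int.emod_emod_of_dvd _ dvd_rfl, ← Int.mul_emod]

-- B's reversed fold with a doubling weight, characterised: total ≡ t + Wsum, weight ≡ w·2^len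
theorem revfold (ds : List Int) (t w : Int) :
    ds.reverse.foldl (fun s d => ((s.1 + d * s.2) % 11, s.2 * 2 % 11)) (t % 11, w % 11)
      = ((t + Wsum ds w) % 11, w * 2 ^ ds.length % 11) := by
  induction ds with
  | nil => simp [Wsum]
  | cons d ds ih =>
    simp only [List.reverse_cons, List.foldl_append, ih, List.foldl_cons, List.foldl_nil,
      Prod.mk.injEq]
    refine ⟨?_, ?_⟩
    · rw [modmix]
      congr 1
      simp only [Wsum]
      ring
    · rw [modmul2, List.length_cons, pow_succ]
      ring_nf

-- A's fold over the raw characters (skipping '-') is the Horner fold over the filtered digit values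
theorem fold_filter_map (l : List Char) (t : Int) :
    l.foldl (fun t c => if c == '-' then t else (t + pvDigit c) * 2) t
      = ((l.filter (fun c => c != '-')).map pvDigit).foldl (fun t d => (t + d) * 2) t := by
  induction l generalizing t with
  | nil => rfl
  | cons c l ih =>
    simp only [List.foldl_cons]
    by_cases h : c = '-'
    · rw [if_pos (show (c == '-') = true by simp [h]),
        show List.filter (fun c => c != '-') (c :: l) = List.filter (fun c => c != '-') l by
          simp [h]]
      exact ih t
    · rw [if_neg (show ¬ (c == '-') = true by simp [h]),
        show List.filter (fun c => c != '-') (c :: l)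
            = c :: List.filter (fun c => c != '-') l by simp [h]]
      simp only [List.map_cons, List.foldl_cons]
      exact ih _

-- a char with isdigit = true is one of the ten ASCII digits
theorem digit_cases (c : Char) (h : PySem.Chars.isdigit c = true) :
    c ∈ ['0','1','2','3','4','5','6','7','8','9'] := by
  simp only [PySem.Chars.isdigit, Bool.and_eq_true, decide_eq_true_eq, Char.le_def] at h
  obtain ⟨h1, h2⟩ := h
  have h1' : 48 ≤ c.toNat := h1
  have h2' : c.toNat ≤ 57 := h2
  have hc : Char.ofNat c.toNat = c := Char.ofNat_toNat c
  interval_cases h3 : c.toNat <;> rw [← hc] <;> decide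

-- B's numeric comparison of the last char equals A's string comparison, for 0 ≤ check < 11
theorem tail_eq (last : Char) (check : Int) (h0 : 0 ≤ check) (h1 : check < 11) :
    ((if last == 'X' then (10 : Int)
      else if PySem.Chars.isdigit last then pvDigit last else -1) == check)
      = (([last] : List Char) == (if check == 10 then ['X'] else PySem.Int.toChars check)) := by
  by_cases hx : last = 'X'
  · subst hx; interval_cases check <;> decide
  · by_cases hd : PySem.Chars.isdigit last = true
    · have hmem := digit_cases last hd
      simp only [List.mem_cons, List.not_mem_nil, or_false] at hmem
      rcases hmem with rfl|rfl|rfl|rfl|rfl|rfl|rfl|rfl|rfl|rfl <;>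
        interval_cases check <;> decide
    · have hbx : (last == 'X') = false := by simp [hx]
      have hbd : PySem.Chars.isdigit last = false := by
        cases hval : PySem.Chars.isdigit last
        · rfl
        · exact absurd hval hd
      have hn0 : last ≠ '0' := by intro h; rw [h] at hbd; exact absurd hbd (by decide)
      have hn1 : last ≠ '1' := by intro h; rw [h] at hbd; exact absurd hbd (by decide)
      have hn2 : last ≠ '2' := by intro h; rw [h] at hbd; exact absurd hbd (by decide)
      have hn3 : last ≠ '3' := by intro h; rw [h] at hbd; exact absurd hbd (by decide)
      have hn4 : last ≠ '4' := by intro h; rw [h] at hbd; exact absurd hbd (by decide)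
      have hn5 : last ≠ '5' := by intro h; rw [h] at hbd; exact absurd hbd (by decide)
      have hn6 : last ≠ '6' := by intro h; rw [h] at hbd; exact absurd hbd (by decide)
      have hn7 : last ≠ '7' := by intro h; rw [h] at hbd; exact absurd hbd (by decide)
      have hn8 : last ≠ '8' := by intro h; rw [h] at hbd; exact absurd hbd (by decide)
      have hn9 : last ≠ '9' := by intro h; rw [h] at hbd; exact absurd hbd (by decide)
      have e0 : PySem.Int.toChars 0 = ['0'] := by decide
      have e1 : PySem.Int.toChars 1 = ['1'] := by decide
      have e2 : PySem.Int.toChars 2 = ['2'] := by decide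
      have e3 : PySem.Int.toChars 3 = ['3'] := by decide
      have e4 : PySem.Int.toChars 4 = ['4'] := by decide
      have e5 : PySem.Int.toChars 5 = ['5'] := by decide
      have e6 : PySem.Int.toChars 6 = ['6'] := by decide
      have e7 : PySem.Int.toChars 7 = ['7'] := by decide
      have e8 : PySem.Int.toChars 8 = ['8'] := by decide
      have e9 : PySem.Int.toChars 9 = ['9'] := by decide
      interval_cases check <;>
        simp [hbx, hbd, hn0, hn1, hn2, hn3, hn4, hn5, hn6, hn7, hn8, hn9,
          e0, e1, e2, e3, e4, e5, e6, e7, e8, e9]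

-- ===== VERDICT (by name: the statement is the Claim_ definition above) =====
theorem validate_orcid_checksum_py_spec : Claim_equal_validate_orcid_checksum_py := by
  intro s _ _
  unfold Spec_validate_orcid_checksum_py validate_orcid_checksum_py validate_orcid_checksum_py_alt
  cases hlast : PySem.List.pyGet? s.toList (-1) with
  | none => simp only [hlast]
  | some last =>
    simp only [hlast]
    -- rewrite B's character fold into the fold over the reversed filtered digit list
    rw [PySem.List.foldl_if_eq_foldl_filter (fun c => c != '-')
        (fun s c => (PySem.Int.mod (s.1 + pvDigit c * s.2) 11, PySem.Int.mod (s.2 * 2) 11)),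
      List.filter_reverse]
    rw [show (fun (s : Int × Int) (c : Char) =>
          (PySem.Int.mod (s.1 + pvDigit c * s.2) 11, PySem.Int.mod (s.2 * 2) 11))
        = (fun s c => ((s.1 + pvDigit c * s.2) % 11, s.2 * 2 % 11)) by
      funext s c; rw [mod11, mod11]]
    rw [← List.foldl_map (f := pvDigit)
        (g := fun (s : Int × Int) (d : Int) => ((s.1 + d * s.2) % 11, s.2 * 2 % 11)),
      List.map_reverse]
    rw [show ((0 : Int), (2 : Int)) = ((0 : Int) % 11, (2 : Int) % 11) by norm_num]
    rw [revfold]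
    -- rewrite A's character fold into the Horner fold over the filtered digit list
    rw [fold_filter_map, horner_eq_wsum]
    simp only [mod11]
    simp only [zero_mul, zero_add]
    -- compare the two final tests via tail_eq
    exact (tail_eq last _ (Int.emod_nonneg _ (by norm_num))
      (Int.emod_lt_of_pos _ (by norm_num))).symm
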